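-- pv_equiv track=rewrite | github.com/jcolinpatrick/kryptos | scripts/e_grille_03_transposition_attacks.py | skip_read
-- ===== SOURCE A (Python) =====
-- def skip_read(ct: str, skip: int, offset: int) -> str:
--     """Read every skip-th character starting at offset."""
--     result = []
--     idx = offset
--     visited = set()
--     while len(result) < len(ct):
--         actual = idx % len(ct)
--         if actual in visited:
--             # Find next unvisited
--             found = False
--             for j in range(len(ct)):
--                 if j not in visited:
--                     actual = j
--                     found = True
--                     break
--             if not found:
--                 break
--         visited.add(actual)
--         result.append(ct[actual])
--         idx += skip
--     return "".join(result)
-- ===== SOURCE B (Python) =====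
-- def skip_read(ct: str, skip: int, offset: int) -> str:
--     """Read every skip-th character starting at offset; on collision take the
--     smallest unvisited index, tracked by a monotone pointer (O(n) total)."""
--     n = len(ct)
--     visited = [False] * n
--     p = 0  # every index below p is visited
--     out = []
--     idx = offset
--     for _ in range(n):
--         a = idx % n
--         if visited[a]:
--             while visited[p]:
--                 p += 1
--             a = p
--         visited[a] = True
--         out.append(ct[a])
--         idx += skip
--     return "".join(out)
-- ===== Notes on version B (the rewrite author's own statement) =====
-- stated objective: faster
-- what changed: Replaces A's full rescan of range(n) on every collision (and its Python set) with a boolean visited array plus a monotone pointer to the smallest unvisited index, so each index is inspected O(1) amortized times.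
import Mathlib
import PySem

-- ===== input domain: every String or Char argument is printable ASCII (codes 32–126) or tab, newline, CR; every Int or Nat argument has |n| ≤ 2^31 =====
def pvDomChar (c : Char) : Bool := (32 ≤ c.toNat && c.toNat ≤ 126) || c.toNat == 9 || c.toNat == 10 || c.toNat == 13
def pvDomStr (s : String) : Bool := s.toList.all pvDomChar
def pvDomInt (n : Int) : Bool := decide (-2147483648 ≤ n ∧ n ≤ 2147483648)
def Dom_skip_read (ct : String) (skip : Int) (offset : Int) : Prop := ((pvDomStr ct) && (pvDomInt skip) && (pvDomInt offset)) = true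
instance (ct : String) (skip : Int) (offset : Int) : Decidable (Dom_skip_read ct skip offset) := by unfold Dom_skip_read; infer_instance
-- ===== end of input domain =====

-- B replaces A's full rescan of range(n) on every collision with a boolean visited
-- array and a monotone pointer to the smallest unvisited index (objective: faster).

-- ===== PORT A =====
-- the inner 'for j in range(len(ct)): if j not in visited: actual = j; found = True; break'
def pvFindNext (visited : PySem.Set Int) : List Int → Option Int
  | [] => none
  | j :: js => if PySem.Set.contains visited j then pvFindNext visited js else some j

-- the 'while len(result) < len(ct)' loop of A
def pvLoopA (ctl : List Char) (skip : Int) (result : List Char) (idx : Int)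
    (visited : PySem.Set Int) : List Char :=
  if h : result.length < ctl.length then
    let actual := PySem.Int.mod idx (ctl.length : Int)
    if PySem.Set.contains visited actual then
      match pvFindNext visited (PySem.List.pyRange 0 (ctl.length : Int) 1) with
      | none => result            -- 'if not found: break'
      | some j =>
          pvLoopA ctl skip (result ++ [PySem.List.pyGetD ctl j ' ']) (idx + skip)
            (PySem.Set.add visited j)
    else
      pvLoopA ctl skip (result ++ [PySem.List.pyGetD ctl actual ' ']) (idx + skip)
        (PySem.Set.add visited actual)
  else result
termination_by ctl.length - result.length
decreasing_by
  · simp only [List.length_append, List.length_cons, List.length_nil]; omega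
  · simp only [List.length_append, List.length_cons, List.length_nil]; omega

def skip_read (ct : String) (skip : Int) (offset : Int) : String :=
  String.mk (pvLoopA ct.toList skip [] offset ([] : PySem.Set Int))

-- ===== PORT B =====
-- 'while visited[p]: p += 1' (on reachable states p never runs past the array;
-- out of range, getD reads false and the loop stops, where Python would raise)
def pvAdvance (visited : List Bool) (p : Nat) : Nat :=
  if h : visited.getD p false then pvAdvance visited (p + 1) else p
termination_by visited.length - p
decreasing_by
  have hp : p < visited.length := by
    by_contra hge
    rw [List.getD_eq_getElem?_getD, List.getElem?_eq_none (by omega)] at h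
    simp at h
  omega

-- the 'for _ in range(n)' loop of B
def pvLoopB (ctl : List Char) (skip : Int) : Nat → List Bool → Nat → List Char → Int → List Char
  | 0, _, _, out, _ => out
  | r + 1, visited, p, out, idx =>
    let a := (PySem.Int.mod idx (ctl.length : Int)).toNat
    if visited.getD a false then
      let q := pvAdvance visited p
      pvLoopB ctl skip r (visited.set q true) q (out ++ [ctl.getD q ' ']) (idx + skip)
    else
      pvLoopB ctl skip r (visited.set a true) p (out ++ [ctl.getD a ' ']) (idx + skip)

def skip_read_alt (ct : String) (skip : Int) (offset : Int) : String :=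
  String.mk
    (pvLoopB ct.toList skip ct.toList.length (List.replicate ct.toList.length false) 0 [] offset)

-- ===== PRECONDITION & SPEC =====
def Spec_skip_read (ct : String) (skip : Int) (offset : Int) (out : String) : Prop := out = skip_read_alt ct skip offset
instance (ct : String) (skip : Int) (offset : Int) (out : String) : Decidable (Spec_skip_read ct skip offset out) := by unfold Spec_skip_read; infer_instance

-- ===== CLAIM (what is proved, stated in full; the proofs are below) =====
def Claim_equal_skip_read : Prop := ∀ (ct : String) (skip : Int) (offset : Int), Dom_skip_read ct skip offset → Spec_skip_read ct skip offset (skip_read ct skip offset)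

-- ===== LEMMAS AND PROOFS =====

theorem pvAdvance_spec (visited : List Bool) (p : Nat) :
    p ≤ pvAdvance visited p ∧ visited.getD (pvAdvance visited p) false = false ∧
      ∀ i, p ≤ i → i < pvAdvance visited p → visited.getD i false = true := by
  fun_induction pvAdvance visited p with
  | case1 p h ih =>
      refine ⟨by omega, ih.2.1, fun i h1 h2 => ?_⟩
      rcases Nat.eq_or_lt_of_le h1 with rfl | hlt
      · exact h
      · exact ih.2.2 i hlt h2
  | case2 p h => exact ⟨le_refl _, by simpa using h, fun i h1 h2 => by omega⟩

theorem pvFindNext_pyRange (visited : PySem.Set Int) (q : Int) :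
    ∀ (k : Nat) (a b : Int), b - a ≤ (k : Int) → a ≤ q → q < b →
      PySem.Set.contains visited q = false →
      (∀ i : Int, a ≤ i → i < q → PySem.Set.contains visited i = true) →
      pvFindNext visited (PySem.List.pyRange a b 1) = some q := by
  intro k
  induction k with
  | zero => intro a b hk ha hb _ _; omega
  | succ k ih =>
    intro a b hk ha hb hq hall
    rw [PySem.List.pyRange_one_cons (by omega)]
    by_cases hca : PySem.Set.contains visited a
    · have haq : a ≠ q := fun h => by rw [h, hq] at hca; exact Bool.false_ne_true hca
      rw [pvFindNext, if_pos hca]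
      exact ih (a + 1) b (by omega) (by omega) hb hq (fun i h1 h2 => hall i (by omega) h2)
    · have haq : a = q := by
        by_contra hne
        exact hca (hall a (le_refl a) (lt_of_le_of_ne ha hne))
      rw [pvFindNext, if_neg hca, haq]

theorem getD_set_bool (l : List Bool) (i j : Nat) (b : Bool) :
    (l.set i b).getD j false = if j = i ∧ i < l.length then b else l.getD j false := by
  rw [List.getD_eq_getElem?_getD, List.getD_eq_getElem?_getD, List.getElem?_set]
  by_cases h : i = j
  · subst h
    by_cases hl : i < l.length
    · simp [hl]
    · simp [hl]
  · have h' : ¬(j = i) := fun hh => h hh.symm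
    simp [h, h']

theorem count_set_true (l : List Bool) (q : Nat) (hq : q < l.length)
    (hfalse : l.getD q false = false) :
    (l.set q true).count true = l.count true + 1 := by
  have hgf : l[q] = false := by
    rw [List.getD_eq_getElem?_getD, List.getElem?_eq_getElem hq] at hfalse
    simpa using hfalse
  rw [List.count_set hq]
  simp [hgf]

theorem exists_false_of_count_lt (l : List Bool) (h : l.count true < l.length) :
    ∃ j, j < l.length ∧ l.getD j false = false := by
  by_contra hc
  push_neg at hc
  have hall : ∀ b ∈ l, true = b := by
    intro b hb
    obtain ⟨j, hj, rfl⟩ := List.mem_iff_getElem.mp hb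
    have hj' := hc j hj
    rw [List.getD_eq_getElem?_getD, List.getElem?_eq_getElem hj] at hj'
    simpa using (Bool.of_not_eq_false (by simpa using hj'))
  have := List.count_eq_length.mpr hall
  omega

theorem loop_eq (ctl : List Char) (skip : Int) :
    ∀ (r : Nat) (visA : PySem.Set Int) (visB : List Bool) (p : Nat) (out : List Char) (idx : Int),
    visB.length = ctl.length →
    (∀ j : Nat, j < ctl.length → (PySem.Set.contains visA (j : Int) = visB.getD j false)) →
    (∀ j : Nat, j < p → visB.getD j false = true) →
    visB.count true = out.length →
    r = ctl.length - out.length →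
    pvLoopA ctl skip out idx visA = pvLoopB ctl skip r visB p out idx := by
  intro r
  induction r with
  | zero =>
    intro visA visB p out idx h1 h2 h3 h4 h5
    rw [pvLoopA, dif_neg (by omega), pvLoopB]
  | succ r ih =>
    intro visA visB p out idx h1 h2 h3 h4 h5
    have hlt : out.length < ctl.length := by omega
    have hnpos : (0 : Int) < (ctl.length : Int) := Int.natCast_pos.mpr (by omega)
    set a0 : Int := PySem.Int.mod idx (ctl.length : Int) with ha0def
    have ha0nn : 0 ≤ a0 := PySem.Int.mod_nonneg idx hnpos
    have ha0lt : a0 < (ctl.length : Int) := PySem.Int.mod_lt idx hnpos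
    have hanat : ((a0.toNat : Nat) : Int) = a0 := Int.toNat_of_nonneg ha0nn
    have hanatlt : a0.toNat < ctl.length := by omega
    rw [pvLoopA, dif_pos hlt]
    simp only [← ha0def]
    rw [pvLoopB]
    simp only [← ha0def]
    have hcontains : PySem.Set.contains visA a0 = visB.getD a0.toNat false := by
      rw [← hanat]; exact h2 a0.toNat hanatlt
    by_cases hc : visB.getD a0.toNat false
    · -- collision branch
      rw [if_pos (by rw [hcontains]; exact hc), if_pos hc]
      obtain ⟨hpq, hqfalse, hmid⟩ := pvAdvance_spec visB p
      set q := pvAdvance visB p with hqdef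
      have hbelow : ∀ j : Nat, j < q → visB.getD j false = true := by
        intro j hj
        by_cases hjp : j < p
        · exact h3 j hjp
        · exact hmid j (by omega) hj
      have hqlt : q < ctl.length := by
        obtain ⟨j, hjlen, hjfalse⟩ := exists_false_of_count_lt visB (by omega)
        have : q ≤ j := by
          by_contra hgt
          rw [hbelow j (by omega)] at hjfalse
          exact absurd hjfalse (by simp)
        omega
      have hfind : pvFindNext visA (PySem.List.pyRange 0 (ctl.length : Int) 1) = some (q : Int) := by
        apply pvFindNext_pyRange visA (q : Int) ctl.length 0 (ctl.length : Int) (by omega)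
          (by exact_mod_cast Nat.zero_le q) (by exact_mod_cast hqlt)
        · rw [h2 q hqlt]; exact hqfalse
        · intro i hi0 hiq
          have : i = ((i.toNat : Nat) : Int) := (Int.toNat_of_nonneg hi0).symm
          rw [this, h2 i.toNat (by omega)]
          exact hbelow i.toNat (by omega)
      have hqnotmem : (q : Int) ∉ visA := by
        intro hm
        have hct := (PySem.Set.contains_iff visA ((q : Nat) : Int)).mpr hm
        rw [h2 q hqlt] at hct
        rw [hct] at hqfalse
        exact absurd hqfalse (by simp)
      have hchar : PySem.List.pyGetD ctl ((q : Nat) : Int) ' ' = ctl.getD q ' ' :=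
        PySem.List.pyGetD_natCast ctl q ' '
      have hqlt' : q < visB.length := by omega
      rw [hfind]
      show pvLoopA ctl skip (out ++ [PySem.List.pyGetD ctl ((q : Nat) : Int) ' ']) (idx + skip)
          (PySem.Set.add visA ((q : Nat) : Int)) = _
      rw [hchar]
      apply ih
      · simpa using h1
      · intro j hj
        rw [PySem.Set.add_eq_ite, if_neg hqnotmem]
        have hmemiff : PySem.Set.contains (visA ++ [(q : Int)]) (j : Int)
            = (PySem.Set.contains visA (j : Int) || decide ((j : Int) = (q : Int))) := by
          by_cases hm : (j : Int) ∈ visA ++ [(q : Int)]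
          · rw [(PySem.Set.contains_iff _ _).mpr hm]
            rcases List.mem_append.mp hm with hm1 | hm2
            · rw [(PySem.Set.contains_iff _ _).mpr hm1]; simp
            · simp at hm2; simp [hm2]
          · have hna : (j : Int) ∉ visA := fun h => hm (List.mem_append.mpr (Or.inl h))
            have hne : (j : Int) ≠ (q : Int) := fun h => hm (by simp [h])
            rw [Bool.eq_false_iff.mpr (fun h => hna ((PySem.Set.contains_iff _ _).mp h))]
            rw [Bool.eq_false_iff.mpr (fun h => hm ((PySem.Set.contains_iff _ _).mp h))]
            simp [hne]
        rw [hmemiff, getD_set_bool, h2 j hj]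
        by_cases hjq : j = q
        · simp [hjq, hqlt']
        · have : ((j : Nat) : Int) ≠ ((q : Nat) : Int) := by exact_mod_cast hjq
          simp [hjq, this]
      · intro j hj
        rw [getD_set_bool]
        by_cases hjq : j = q
        · simp [hjq, hqlt']
        · rw [if_neg (by tauto)]; exact hbelow j hj
      · rw [count_set_true visB q (by omega) hqfalse, h4]
        simp
      · simp; omega
    · -- fresh-index branch
      rw [if_neg (by rw [hcontains]; exact hc), if_neg hc]
      have hnotmem : a0 ∉ visA := fun hm =>
        hc (by rw [← hcontains]; exact (PySem.Set.contains_iff visA a0).mpr hm)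
      have hchar : PySem.List.pyGetD ctl a0 ' ' = ctl.getD a0.toNat ' ' := by
        rw [← hanat]; exact PySem.List.pyGetD_natCast ctl a0.toNat ' '
      have hanatlt' : a0.toNat < visB.length := by omega
      rw [hchar]
      apply ih
      · simpa using h1
      · intro j hj
        rw [PySem.Set.add_eq_ite, if_neg hnotmem]
        have hmemiff : PySem.Set.contains (visA ++ [a0]) (j : Int)
            = (PySem.Set.contains visA (j : Int) || decide ((j : Int) = a0)) := by
          by_cases hm : (j : Int) ∈ visA ++ [a0]
          · rw [(PySem.Set.contains_iff _ _).mpr hm]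
            rcases List.mem_append.mp hm with hm1 | hm2
            · rw [(PySem.Set.contains_iff _ _).mpr hm1]; simp
            · simp at hm2; simp [hm2]
          · have hna : (j : Int) ∉ visA := fun h => hm (List.mem_append.mpr (Or.inl h))
            have hne : (j : Int) ≠ a0 := fun h => hm (by simp [h])
            rw [Bool.eq_false_iff.mpr (fun h => hna ((PySem.Set.contains_iff _ _).mp h))]
            rw [Bool.eq_false_iff.mpr (fun h => hm ((PySem.Set.contains_iff _ _).mp h))]
            simp [hne]
        rw [hmemiff, getD_set_bool, h2 j hj]
        by_cases hjq : j = a0.toNat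
        · simp [hjq, hanat, hanatlt']
        · have : ((j : Nat) : Int) ≠ a0 := by rw [← hanat]; exact_mod_cast hjq
          simp [hjq, this]
      · intro j hj
        rw [getD_set_bool]
        by_cases hjq : j = a0.toNat
        · simp [hjq, hanatlt']
        · rw [if_neg (by tauto)]; exact h3 j hj
      · rw [count_set_true visB a0.toNat hanatlt' (by simpa using hc), h4]
        simp
      · simp; omega

-- ===== VERDICT (by name: the statement is the Claim_ definition above) =====
theorem skip_read_spec : Claim_equal_skip_read := by
  intro ct skip offset _dom
  unfold Spec_skip_read skip_read skip_read_alt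
  congr 1
  apply loop_eq
  · simp
  · intro j hj
    have hg : (List.replicate ct.toList.length false).getD j false = false := by
      rw [List.getD_eq_getElem?_getD, List.getElem?_replicate]
      split <;> rfl
    rw [hg, Bool.eq_false_iff]
    intro h
    exact absurd ((PySem.Set.contains_iff ([] : PySem.Set Int) (j : Int)).mp h) (by simp)
  · intro j hj; omega
  · simp [List.count_replicate]
  · simp
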